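-- pv_equiv track=rewrite | github.com/JannikIrmai/min-max-correlation-clustering | DMN.py | MinMaxLPneighbors
-- ===== SOURCE A (Python) =====
-- def MinMaxLPneighbors(n, distances, r, r2):
--     #initialize a dictionary that stores the L_t values of each vertex
--     L_t_vals = {}
--     #initialize the dictionaries that store the r and r2 neighborhoods of each vertex
--     neighborsR = {}
--     neighborsR2 = {}
--     for k in range(n):
--         L_t_vals.update({k: 0})
--         neighborsR.update({k: []})
--         neighborsR2.update({k: []})
--
--     for u in range(n):
--         for w in range(n-u-1):
--             v = u + w + 1
--             #add to r2-neighborhood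
--             if distances[u][v] <= r2:
--                 neighborsR2[u].append(v)
--                 neighborsR2[v].append(u)
--                 #update L_t values and add to r-neighborhood
--                 if distances[u][v] <= r:
--                     L_t_vals[u] = L_t_vals[u] + r - distances[u][v]
--                     neighborsR[u].append(v)
--                     L_t_vals[v] = L_t_vals[v] + r - distances[u][v]
--                     neighborsR[v].append(u)
--     return L_t_vals, neighborsR, neighborsR2
-- ===== SOURCE B (Python) =====
-- def MinMaxLPneighbors(n, distances, r, r2):
--     # Per-vertex decomposition: each vertex scans all other vertices once,
--     # reading the upper-triangle entry distances[min(u,v)][max(u,v)],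
--     # and its three results are computed locally and stored once.
--     L_t_vals = {}
--     neighborsR = {}
--     neighborsR2 = {}
--     for u in range(n):
--         total = 0
--         nr = []
--         nr2 = []
--         for v in range(n):
--             if v == u:
--                 continue
--             d = distances[min(u, v)][max(u, v)]
--             if d <= r2:
--                 nr2.append(v)
--                 if d <= r:
--                     nr.append(v)
--                     total += r - d
--         L_t_vals[u] = total
--         neighborsR[u] = nr
--         neighborsR2[u] = nr2
--     return L_t_vals, neighborsR, neighborsR2
-- ===== Notes on version B (the rewrite author's own statement) =====
-- stated objective: alternative
-- what changed: Replaces the symmetric upper-triangle pair loop (each pair updating both endpoints' dict entries in place) by a per-vertex full scan: each vertex u scans all v, reads distances[min(u,v)][max(u,v)], and builds its own L_t value and both neighbor lists locally, stored once per vertex.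
import Mathlib
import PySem

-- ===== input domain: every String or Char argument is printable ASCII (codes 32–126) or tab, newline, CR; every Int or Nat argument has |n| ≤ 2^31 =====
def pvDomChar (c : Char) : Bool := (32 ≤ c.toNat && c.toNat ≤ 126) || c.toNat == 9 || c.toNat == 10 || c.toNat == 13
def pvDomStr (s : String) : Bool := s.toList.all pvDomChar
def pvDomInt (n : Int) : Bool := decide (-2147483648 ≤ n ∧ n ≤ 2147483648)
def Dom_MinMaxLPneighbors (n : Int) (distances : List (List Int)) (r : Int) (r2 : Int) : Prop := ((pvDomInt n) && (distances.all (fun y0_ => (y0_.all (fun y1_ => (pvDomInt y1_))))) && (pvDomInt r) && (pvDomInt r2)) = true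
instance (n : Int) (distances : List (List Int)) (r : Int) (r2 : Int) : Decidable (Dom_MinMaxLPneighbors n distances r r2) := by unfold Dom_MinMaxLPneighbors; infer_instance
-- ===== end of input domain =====

-- B replaces A's symmetric upper-triangle pair loop (each pair pushing updates into both
-- endpoints' dict entries) by a per-vertex full scan that builds each vertex's L_t value and
-- neighbor lists locally and stores them once (objective: alternative decomposition, same cost).

-- ===== PORT A =====
def MinMaxLPneighbors (n : Int) (distances : List (List Int)) (r : Int) (r2 : Int) :
    (List (Int × Int)) × (List (Int × List Int)) × (List (Int × List Int)) :=
  let init :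
      PySem.Dict Int Int × PySem.Dict Int (List Int) × PySem.Dict Int (List Int) :=
    (PySem.List.pyRange 0 n 1).foldl
      (fun st k => (st.1.insert k 0, st.2.1.insert k [], st.2.2.insert k []))
      (PySem.Dict.empty, PySem.Dict.empty, PySem.Dict.empty)
  let final :=
    (PySem.List.pyRange 0 n 1).foldl (fun st u =>
      (PySem.List.pyRange 0 (n - u - 1) 1).foldl (fun st w =>
        let v := u + w + 1
        let d := PySem.List.pyGetD (PySem.List.pyGetD distances u []) v 0
        if d ≤ r2 then
          let nr2 := (st.2.2.modify u [] (· ++ [v])).modify v [] (· ++ [u])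
          if d ≤ r then
            ((st.1.modify u 0 (· + (r - d))).modify v 0 (· + (r - d)),
             (st.2.1.modify u [] (· ++ [v])).modify v [] (· ++ [u]),
             nr2)
          else (st.1, st.2.1, nr2)
        else st) st) init
  (final.1.items, final.2.1.items, final.2.2.items)

-- ===== PORT B =====
-- inner per-vertex scan of Source B (the 'for v in range(n)' loop with its three local accumulators)
def pvBRow (n : Int) (distances : List (List Int)) (r : Int) (r2 : Int) (u : Int) :
    Int × List Int × List Int :=
  (PySem.List.pyRange 0 n 1).foldl (fun acc v =>
    if v = u then acc
    else
      let d := PySem.List.pyGetD (PySem.List.pyGetD distances (min u v) []) (max u v) 0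
      if d ≤ r2 then
        if d ≤ r then (acc.1 + (r - d), acc.2.1 ++ [v], acc.2.2 ++ [v])
        else (acc.1, acc.2.1, acc.2.2 ++ [v])
      else acc) (0, [], [])

def MinMaxLPneighbors_alt (n : Int) (distances : List (List Int)) (r : Int) (r2 : Int) :
    (List (Int × Int)) × (List (Int × List Int)) × (List (Int × List Int)) :=
  let final :
      PySem.Dict Int Int × PySem.Dict Int (List Int) × PySem.Dict Int (List Int) :=
    (PySem.List.pyRange 0 n 1).foldl (fun st u =>
      let row := pvBRow n distances r r2 u
      (st.1.insert u row.1, st.2.1.insert u row.2.1, st.2.2.insert u row.2.2))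
      (PySem.Dict.empty, PySem.Dict.empty, PySem.Dict.empty)
  (final.1.items, final.2.1.items, final.2.2.items)

-- ===== PRECONDITION & SPEC =====
-- Pre_ excludes exactly the inputs on which the Python raises IndexError: for n ≥ 2 every
-- accessed cell distances[u][v] (0 ≤ u < v < n) must exist.
def Pre_MinMaxLPneighbors (n : Int) (distances : List (List Int)) (r : Int) (r2 : Int) : Prop :=
  n ≤ 1 ∨ (n - 1 ≤ (distances.length : Int) ∧
    ∀ row ∈ distances.take (n - 1).toNat, (n : Int) ≤ (row.length : Int))
instance (n : Int) (distances : List (List Int)) (r : Int) (r2 : Int) : Decidable (Pre_MinMaxLPneighbors n distances r r2) := by unfold Pre_MinMaxLPneighbors; infer_instance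
def pvWitness_MinMaxLPneighbors : Int × List (List Int) × Int × Int := (2, [[0, 1], [1, 0]], 1, 1)

def Spec_MinMaxLPneighbors (n : Int) (distances : List (List Int)) (r : Int) (r2 : Int) (out : (List (Int × Int)) × (List (Int × List Int)) × (List (Int × List Int))) : Prop := out = MinMaxLPneighbors_alt n distances r r2
instance (n : Int) (distances : List (List Int)) (r : Int) (r2 : Int) (out : (List (Int × Int)) × (List (Int × List Int)) × (List (Int × List Int))) : Decidable (Spec_MinMaxLPneighbors n distances r r2 out) := by unfold Spec_MinMaxLPneighbors; infer_instance

-- ===== CLAIM (what is proved, stated in full; the proofs are below) =====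
def Claim_equal_MinMaxLPneighbors : Prop := ∀ (n : Int) (distances : List (List Int)) (r : Int) (r2 : Int), Dom_MinMaxLPneighbors n distances r r2 → Pre_MinMaxLPneighbors n distances r r2 → Spec_MinMaxLPneighbors n distances r r2 (MinMaxLPneighbors n distances r r2)

-- ===== LEMMAS AND PROOFS =====

-- the distance-matrix cell both Pythons read for an (ordered) index pair
def pvD (dm : List (List Int)) (u v : Int) : Int :=
  PySem.List.pyGetD (PySem.List.pyGetD dm u []) v 0

-- A's pair list: all (u, v) with 0 ≤ u < v < n, in A's lexicographic visit order
def pvPairs (n : Int) : List (Int × Int) :=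
  (PySem.List.pyRange 0 n 1).flatMap (fun u =>
    (PySem.List.pyRange (u + 1) n 1).map (fun v => (u, v)))

-- componentwise forms of A's per-pair update, one per dictionary
def pvFL (dm : List (List Int)) (r r2 : Int) (d : PySem.Dict Int Int) (p : Int × Int) :
    PySem.Dict Int Int :=
  if pvD dm p.1 p.2 ≤ r2 ∧ pvD dm p.1 p.2 ≤ r then
    (d.modify p.1 0 (· + (r - pvD dm p.1 p.2))).modify p.2 0 (· + (r - pvD dm p.1 p.2))
  else d

def pvFR (dm : List (List Int)) (r r2 : Int) (d : PySem.Dict Int (List Int)) (p : Int × Int) :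
    PySem.Dict Int (List Int) :=
  if pvD dm p.1 p.2 ≤ r2 ∧ pvD dm p.1 p.2 ≤ r then
    (d.modify p.1 [] (· ++ [p.2])).modify p.2 [] (· ++ [p.1])
  else d

def pvFR2 (dm : List (List Int)) (r2 : Int) (d : PySem.Dict Int (List Int)) (p : Int × Int) :
    PySem.Dict Int (List Int) :=
  if pvD dm p.1 p.2 ≤ r2 then
    (d.modify p.1 [] (· ++ [p.2])).modify p.2 [] (· ++ [p.1])
  else d

def pvL0 (n : Int) : PySem.Dict Int Int :=
  (PySem.List.pyRange 0 n 1).foldl (fun d k => d.insert k 0) PySem.Dict.empty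

def pvNR0 (n : Int) : PySem.Dict Int (List Int) :=
  (PySem.List.pyRange 0 n 1).foldl (fun d k => d.insert k []) PySem.Dict.empty

-- a fold over a triple whose components are updated independently is three folds
theorem pvFoldlProd3 {α β δ γ : Type} (l : List γ) (f : α → γ → α) (g : β → γ → β)
    (h : δ → γ → δ) (a : α) (b : β) (c : δ) :
    l.foldl (fun st x => (f st.1 x, g st.2.1 x, h st.2.2 x)) (a, b, c) =
      (l.foldl f a, l.foldl g b, l.foldl h c) := by
  induction l generalizing a b c with
  | nil => rfl
  | cons x xs ih => exact ih (f a x) (g b x) (h c x)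

-- A's triangular double loop is a single fold over the pair list
theorem pvFlattenPairs {σ : Type} (n : Int) (φ : σ → Int × Int → σ) (init : σ) :
    (PySem.List.pyRange 0 n 1).foldl (fun st u =>
        (PySem.List.pyRange 0 (n - u - 1) 1).foldl (fun st w => φ st (u, u + w + 1)) st) init =
      (pvPairs n).foldl φ init := by
  unfold pvPairs
  rw [List.foldl_flatMap]
  apply PySem.List.foldl_congr_mem'
  intro u _ st
  rw [List.foldl_map]
  rw [PySem.List.pyRange_one (u + 1) n, PySem.List.pyRange_one 0 (n - u - 1)]
  rw [List.foldl_map, List.foldl_map]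
  rw [show (n - u - 1 - 0).toNat = (n - (u + 1)).toNat by omega]
  apply PySem.List.foldl_congr_mem'
  intro k _ acc
  have : u + (0 + (k : Int)) + 1 = u + 1 + (k : Int) := by omega
  rw [this]

theorem pvMemPairs {n : Int} {p : Int × Int} (h : p ∈ pvPairs n) :
    0 ≤ p.1 ∧ p.1 < p.2 ∧ p.2 < n := by
  unfold pvPairs at h
  simp only [List.mem_flatMap, List.mem_map, PySem.List.mem_pyRange_one] at h
  obtain ⟨u, ⟨hu0, hun⟩, v, ⟨hv1, hvn⟩, rfl⟩ := h
  exact ⟨hu0, by omega, hvn⟩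

-- value at key t of one symmetric two-key update
theorem pvModAppend (d : PySem.Dict Int (List Int)) (p1 p2 t : Int) :
    ((d.modify p1 [] (· ++ [p2])).modify p2 [] (· ++ [p1])).getD t [] =
      d.getD t [] ++ ((if p1 = t then [p2] else []) ++ (if p2 = t then [p1] else [])) := by
  rcases eq_or_ne p2 t with rfl | h2
  · rcases eq_or_ne p1 p2 with rfl | h1
    · simp
    · simp [PySem.Dict.getD_modify, h1, Ne.symm h1]
  · rcases eq_or_ne p1 t with rfl | h1
    · simp [PySem.Dict.getD_modify, h2, Ne.symm h2]
    · simp [PySem.Dict.getD_modify, h1, h2, Ne.symm h1, Ne.symm h2]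

theorem pvModAdd (d : PySem.Dict Int Int) (p1 p2 t a1 : Int) :
    ((d.modify p1 0 (· + a1)).modify p2 0 (· + a1)).getD t 0 =
      d.getD t 0 + (((if p1 = t then [a1] else []) ++ (if p2 = t then [a1] else [])) : List Int).sum := by
  rcases eq_or_ne p2 t with rfl | h2
  · rcases eq_or_ne p1 p2 with rfl | h1
    · simp
      ring
    · simp [PySem.Dict.getD_modify, h1, Ne.symm h1]
  · rcases eq_or_ne p1 t with rfl | h1
    · simp [PySem.Dict.getD_modify, h2, Ne.symm h2]
    · simp [PySem.Dict.getD_modify, h1, h2, Ne.symm h1, Ne.symm h2]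

-- value at key t after A's list-append pair fold
theorem pvGetDPairfoldAppend (l : List (Int × Int)) (P : Int → Int → Prop)
    [inst : ∀ u v, Decidable (P u v)] (d : PySem.Dict Int (List Int)) (t : Int) :
    (l.foldl (fun d p => if P p.1 p.2 then
        (d.modify p.1 [] (· ++ [p.2])).modify p.2 [] (· ++ [p.1]) else d) d).getD t [] =
      d.getD t [] ++ l.flatMap (fun p => if P p.1 p.2 then
        ((if p.1 = t then [p.2] else []) ++ (if p.2 = t then [p.1] else [])) else []) := by
  induction l generalizing d with
  | nil => simp
  | cons p l ih =>
    obtain ⟨p1, p2⟩ := p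
    simp only [List.foldl_cons, List.flatMap_cons]
    by_cases hP : P p1 p2
    · rw [if_pos hP, if_pos hP, ih]
      rw [pvModAppend, List.append_assoc]
    · rw [if_neg hP, if_neg hP, ih, List.nil_append]

-- value at key t after A's adding pair fold
theorem pvGetDPairfoldAdd (l : List (Int × Int)) (P : Int → Int → Prop)
    [inst : ∀ u v, Decidable (P u v)] (amt : Int → Int → Int) (d : PySem.Dict Int Int) (t : Int) :
    (l.foldl (fun d p => if P p.1 p.2 then
        (d.modify p.1 0 (· + amt p.1 p.2)).modify p.2 0 (· + amt p.1 p.2) else d) d).getD t 0 =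
      d.getD t 0 + (l.flatMap (fun p => if P p.1 p.2 then
        ((if p.1 = t then [amt p.1 p.2] else []) ++ (if p.2 = t then [amt p.1 p.2] else []))
        else [])).sum := by
  induction l generalizing d with
  | nil => simp
  | cons p l ih =>
    obtain ⟨p1, p2⟩ := p
    simp only [List.foldl_cons, List.flatMap_cons]
    by_cases hP : P p1 p2
    · rw [if_pos hP, if_pos hP, ih]
      rw [pvModAdd]
      simp only [List.sum_append]
      ring
    · rw [if_neg hP, if_neg hP, ih, List.nil_append]

-- the pair folds do not change the key list
theorem pvKeysPairfold {ν : Type} (l : List (Int × Int)) (P : Int → Int → Prop)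
    [inst : ∀ u v, Decidable (P u v)] (d0 : ν) (f g : Int → Int → ν → ν)
    (d : PySem.Dict Int ν) (h : ∀ p ∈ l, p.1 ∈ d.keys ∧ p.2 ∈ d.keys) :
    (l.foldl (fun d p => if P p.1 p.2 then
        (d.modify p.1 d0 (f p.1 p.2)).modify p.2 d0 (g p.1 p.2) else d) d).keys = d.keys := by
  revert h
  induction l generalizing d with
  | nil => intro _; rfl
  | cons p l ih =>
    intro h
    simp only [List.foldl_cons]
    have h1 : d.contains p.1 = true :=
      (PySem.Dict.contains_iff_mem_keys d p.1).mpr (h p (List.mem_cons_self ..)).1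
    have h2 : d.contains p.2 = true :=
      (PySem.Dict.contains_iff_mem_keys d p.2).mpr (h p (List.mem_cons_self ..)).2
    by_cases hP : P p.1 p.2
    · rw [if_pos hP]
      have e1 : (d.modify p.1 d0 (f p.1 p.2)).keys = d.keys := by
        rw [PySem.Dict.keys_modify]
        exact PySem.Dict.keys_insert_of_contains d _ h1
      have hc2 : (d.modify p.1 d0 (f p.1 p.2)).contains p.2 = true := by
        rw [PySem.Dict.contains_iff_mem_keys, e1, ← PySem.Dict.contains_iff_mem_keys]
        exact h2
      have hk : ((d.modify p.1 d0 (f p.1 p.2)).modify p.2 d0 (g p.1 p.2)).keys = d.keys := by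
        rw [PySem.Dict.keys_modify, PySem.Dict.keys_insert_of_contains _ _ hc2, e1]
      refine (ih _ ?_).trans hk
      intro q hq
      rw [hk]
      exact h q (List.mem_cons_of_mem _ hq)
    · rw [if_neg hP]
      exact ih d fun q hq => h q (List.mem_cons_of_mem _ hq)

theorem pvInitGetD {ν : Type} (l : List Int) (v : ν) (d : PySem.Dict Int ν) (t : Int)
    (h : d.getD t v = v) : (l.foldl (fun d k => d.insert k v) d).getD t v = v := by
  induction l generalizing d with
  | nil => exact h
  | cons k l ih =>
    refine ih _ ?_
    rw [PySem.Dict.getD_insert]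
    split_ifs
    · rfl
    · exact h

theorem pvInitKeys {ν : Type} (n : Int) (v : ν) :
    ((PySem.List.pyRange 0 n 1).foldl (fun d k => d.insert k v) PySem.Dict.empty).keys =
      PySem.List.pyRange 0 n 1 := by
  rw [PySem.Dict.keys_foldl_insert _ (fun _ _ => v)]
  rw [PySem.Dict.keys_empty, PySem.Set.update_nil_left]
  exact PySem.Set.ofList_eq_self_of_nodup _ (PySem.List.nodup_pyRange_one 0 n)

theorem pvFlatMapIte {α : Type} (l : List Int) (p : Int → Prop) [DecidablePred p]
    (f : Int → α) :
    l.flatMap (fun x => if p x then [f x] else []) =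
      (l.filter (fun x => decide (p x))).map f := by
  induction l with
  | nil => rfl
  | cons x xs ih => by_cases h : p x <;> simp [h, ih]

theorem pvSumIte (l : List Int) (p : Int → Prop) [DecidablePred p] (f : Int → Int) :
    (l.map (fun v => if p v then f v else 0)).sum =
      ((l.filter (fun v => decide (p v))).map f).sum := by
  induction l with
  | nil => rfl
  | cons x xs ih => by_cases h : p x <;> simp [h, ih]

-- the heart of the equivalence: summing each pair's contribution over A's triangular pair
-- order, restricted to one key t, is B's single ascending scan of t's partners
theorem pvPairContrib {α : Type} (n t : Int) (h0 : 0 ≤ t) (htn : t < n)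
    (P : Int → Int → Prop) [inst : ∀ u v, Decidable (P u v)] (F : Int → Int → α) :
    (PySem.List.pyRange 0 n 1).flatMap (fun u =>
        (PySem.List.pyRange (u + 1) n 1).flatMap (fun v =>
          if P u v then
            ((if u = t then [F u v] else []) ++ (if v = t then [F v u] else []))
          else [])) =
      ((PySem.List.pyRange 0 n 1).filter
          (fun v => decide (v ≠ t ∧ P (min t v) (max t v)))).map (fun v => F t v) := by
  have hlow : ∀ u ∈ PySem.List.pyRange 0 t 1,
      (PySem.List.pyRange (u + 1) n 1).flatMap (fun v =>
          if P u v then ((if u = t then [F u v] else []) ++ (if v = t then [F v u] else []))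
          else []) =
        if P u t then [F t u] else [] := by
    intro u hu
    rw [PySem.List.mem_pyRange_one] at hu
    have hut : u ≠ t := by omega
    rw [PySem.List.pyRange_one_append (u + 1) t n (by omega) (by omega),
      PySem.List.pyRange_one_cons htn, List.flatMap_append, List.flatMap_cons]
    have e1 : (PySem.List.pyRange (u + 1) t 1).flatMap (fun v =>
        if P u v then ((if u = t then [F u v] else []) ++ (if v = t then [F v u] else []))
        else []) = [] := by
      rw [List.flatMap_eq_nil_iff]
      intro v hv
      rw [PySem.List.mem_pyRange_one] at hv
      have hvt : v ≠ t := by omega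
      by_cases hP : P u v <;> simp [hP, hut, hvt]
    have e3 : (PySem.List.pyRange (t + 1) n 1).flatMap (fun v =>
        if P u v then ((if u = t then [F u v] else []) ++ (if v = t then [F v u] else []))
        else []) = [] := by
      rw [List.flatMap_eq_nil_iff]
      intro v hv
      rw [PySem.List.mem_pyRange_one] at hv
      have hvt : v ≠ t := by omega
      by_cases hP : P u v <;> simp [hP, hut, hvt]
    rw [e1, e3]
    by_cases hP : P u t <;> simp [hP, hut]
  have hmid : (PySem.List.pyRange (t + 1) n 1).flatMap (fun v =>
      if P t v then ((if t = t then [F t v] else []) ++ (if v = t then [F v t] else []))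
      else []) =
      ((PySem.List.pyRange (t + 1) n 1).filter (fun v => decide (P t v))).map (fun v => F t v) := by
    rw [← pvFlatMapIte (PySem.List.pyRange (t + 1) n 1) (fun v => P t v) (fun v => F t v)]
    apply List.flatMap_congr
    intro v hv
    rw [PySem.List.mem_pyRange_one] at hv
    have hvt : v ≠ t := by omega
    by_cases hP : P t v <;> simp [hP, hvt]
  have hhigh : ∀ u ∈ PySem.List.pyRange (t + 1) n 1,
      (PySem.List.pyRange (u + 1) n 1).flatMap (fun v =>
          if P u v then ((if u = t then [F u v] else []) ++ (if v = t then [F v u] else []))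
          else []) = [] := by
    intro u hu
    rw [PySem.List.mem_pyRange_one] at hu
    rw [List.flatMap_eq_nil_iff]
    intro v hv
    rw [PySem.List.mem_pyRange_one] at hv
    have hut : u ≠ t := by omega
    have hvt : v ≠ t := by omega
    by_cases hP : P u v <;> simp [hP, hut, hvt]
  rw [PySem.List.pyRange_one_append 0 t n h0 (le_of_lt htn), PySem.List.pyRange_one_cons htn,
    List.flatMap_append, List.flatMap_cons, List.filter_append, List.filter_cons,
    List.map_append, List.flatMap_congr hlow, List.flatMap_congr hhigh, hmid]
  have hlow2 : (PySem.List.pyRange 0 t 1).flatMap (fun u => if P u t then [F t u] else []) =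
      ((PySem.List.pyRange 0 t 1).filter (fun u => decide (u ≠ t ∧ P (min t u) (max t u)))).map
        (fun u => F t u) := by
    rw [pvFlatMapIte (PySem.List.pyRange 0 t 1) (fun u => P u t) (fun u => F t u)]
    congr 1
    apply List.filter_congr
    intro u hu
    rw [PySem.List.mem_pyRange_one] at hu
    rw [show min t u = u by omega, show max t u = t by omega]
    apply decide_eq_decide.mpr
    constructor
    · intro h; exact ⟨by omega, h⟩
    · intro h; exact h.2
  have hmid2 : ((PySem.List.pyRange (t + 1) n 1).filter (fun v => decide (P t v))).map
      (fun v => F t v) =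
      ((PySem.List.pyRange (t + 1) n 1).filter
        (fun v => decide (v ≠ t ∧ P (min t v) (max t v)))).map (fun v => F t v) := by
    congr 1
    apply List.filter_congr
    intro v hv
    rw [PySem.List.mem_pyRange_one] at hv
    rw [show min t v = t by omega, show max t v = v by omega]
    apply decide_eq_decide.mpr
    constructor
    · intro h; exact ⟨by omega, h⟩
    · intro h; exact h.2
  rw [hlow2, hmid2]
  simp [List.flatMap_eq_nil_iff]

-- A's result, as a map over the vertex range of per-key values
theorem pvAItems (n : Int) (dm : List (List Int)) (r r2 : Int) :
    MinMaxLPneighbors n dm r r2 =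
      (((pvPairs n).foldl (pvFL dm r r2) (pvL0 n)).items,
       ((pvPairs n).foldl (pvFR dm r r2) (pvNR0 n)).items,
       ((pvPairs n).foldl (pvFR2 dm r2) (pvNR0 n)).items) := by
  have hinit : (PySem.List.pyRange 0 n 1).foldl
      (fun (st : PySem.Dict Int Int × PySem.Dict Int (List Int) × PySem.Dict Int (List Int))
        (k : Int) => (st.1.insert k 0, st.2.1.insert k [], st.2.2.insert k []))
      ((PySem.Dict.empty : PySem.Dict Int Int), (PySem.Dict.empty : PySem.Dict Int (List Int)),
        (PySem.Dict.empty : PySem.Dict Int (List Int))) = (pvL0 n, pvNR0 n, pvNR0 n) :=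
    pvFoldlProd3 (PySem.List.pyRange 0 n 1)
      (fun (d : PySem.Dict Int Int) (k : Int) => d.insert k 0)
      (fun (d : PySem.Dict Int (List Int)) (k : Int) => d.insert k [])
      (fun (d : PySem.Dict Int (List Int)) (k : Int) => d.insert k []) _ _ _
  have hloop : (PySem.List.pyRange 0 n 1).foldl
      (fun (st : PySem.Dict Int Int × PySem.Dict Int (List Int) × PySem.Dict Int (List Int))
        (u : Int) =>
      (PySem.List.pyRange 0 (n - u - 1) 1).foldl (fun st w =>
        let v := u + w + 1
        let d := PySem.List.pyGetD (PySem.List.pyGetD dm u []) v 0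
        if d ≤ r2 then
          let nr2 := (st.2.2.modify u [] (· ++ [v])).modify v [] (· ++ [u])
          if d ≤ r then
            ((st.1.modify u 0 (· + (r - d))).modify v 0 (· + (r - d)),
             (st.2.1.modify u [] (· ++ [v])).modify v [] (· ++ [u]),
             nr2)
          else (st.1, st.2.1, nr2)
        else st) st) (pvL0 n, pvNR0 n, pvNR0 n) =
      ((pvPairs n).foldl (pvFL dm r r2) (pvL0 n),
       (pvPairs n).foldl (pvFR dm r r2) (pvNR0 n),
       (pvPairs n).foldl (pvFR2 dm r2) (pvNR0 n)) := by
    rw [← pvFoldlProd3 (pvPairs n) (pvFL dm r r2) (pvFR dm r r2) (pvFR2 dm r2)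
      (pvL0 n) (pvNR0 n) (pvNR0 n)]
    rw [← pvFlattenPairs n
      (fun st p => (pvFL dm r r2 st.1 p, pvFR dm r r2 st.2.1 p, pvFR2 dm r2 st.2.2 p))]
    apply PySem.List.foldl_congr_mem'
    intro u _ st
    apply PySem.List.foldl_congr_mem'
    intro w _ st'
    obtain ⟨a, b, c⟩ := st'
    show _ = (pvFL dm r r2 a (u, u + w + 1), pvFR dm r r2 b (u, u + w + 1),
      pvFR2 dm r2 c (u, u + w + 1))
    simp only [pvFL, pvFR, pvFR2, pvD]
    split_ifs with hA1 hA2 <;> simp_all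
  dsimp only [MinMaxLPneighbors]
  rw [hinit, hloop]

-- B's result, as a map over the vertex range of the row computations
theorem pvBItems (n : Int) (dm : List (List Int)) (r r2 : Int) :
    MinMaxLPneighbors_alt n dm r r2 =
      ((PySem.List.pyRange 0 n 1).map (fun u => (u, (pvBRow n dm r r2 u).1)),
       (PySem.List.pyRange 0 n 1).map (fun u => (u, (pvBRow n dm r r2 u).2.1)),
       (PySem.List.pyRange 0 n 1).map (fun u => (u, (pvBRow n dm r r2 u).2.2))) := by
  have h1 : MinMaxLPneighbors_alt n dm r r2 =
      (((PySem.List.pyRange 0 n 1).foldl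
          (fun (d : PySem.Dict Int Int) (u : Int) => d.insert u (pvBRow n dm r r2 u).1)
          PySem.Dict.empty).items,
       ((PySem.List.pyRange 0 n 1).foldl
          (fun (d : PySem.Dict Int (List Int)) (u : Int) => d.insert u (pvBRow n dm r r2 u).2.1)
          PySem.Dict.empty).items,
       ((PySem.List.pyRange 0 n 1).foldl
          (fun (d : PySem.Dict Int (List Int)) (u : Int) => d.insert u (pvBRow n dm r r2 u).2.2)
          PySem.Dict.empty).items) := by
    dsimp only [MinMaxLPneighbors_alt]
    rw [pvFoldlProd3 (PySem.List.pyRange 0 n 1)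
      (fun (d : PySem.Dict Int Int) (u : Int) => d.insert u (pvBRow n dm r r2 u).1)
      (fun (d : PySem.Dict Int (List Int)) (u : Int) => d.insert u (pvBRow n dm r r2 u).2.1)
      (fun (d : PySem.Dict Int (List Int)) (u : Int) => d.insert u (pvBRow n dm r r2 u).2.2)]
  rw [h1]
  rw [PySem.Dict.items_foldl_insert_fresh (PySem.List.pyRange 0 n 1) (fun u => u)
      (fun u => (pvBRow n dm r r2 u).1) PySem.Dict.empty
      (fun a _ => PySem.Dict.contains_empty a) (by simpa using PySem.List.nodup_pyRange_one 0 n),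
    PySem.Dict.items_foldl_insert_fresh (PySem.List.pyRange 0 n 1) (fun u => u)
      (fun u => (pvBRow n dm r r2 u).2.1) PySem.Dict.empty
      (fun a _ => PySem.Dict.contains_empty a) (by simpa using PySem.List.nodup_pyRange_one 0 n),
    PySem.Dict.items_foldl_insert_fresh (PySem.List.pyRange 0 n 1) (fun u => u)
      (fun u => (pvBRow n dm r r2 u).2.2) PySem.Dict.empty
      (fun a _ => PySem.Dict.contains_empty a) (by simpa using PySem.List.nodup_pyRange_one 0 n)]
  rfl

-- the three components of B's row, in closed filter/sum form
theorem pvBRowEq (n : Int) (dm : List (List Int)) (r r2 u : Int) :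
    pvBRow n dm r r2 u =
      ((((PySem.List.pyRange 0 n 1).filter (fun v =>
            decide (v ≠ u ∧ (pvD dm (min u v) (max u v) ≤ r2 ∧ pvD dm (min u v) (max u v) ≤ r)))).map
          (fun v => r - pvD dm (min u v) (max u v))).sum,
       (PySem.List.pyRange 0 n 1).filter (fun v =>
          decide (v ≠ u ∧ (pvD dm (min u v) (max u v) ≤ r2 ∧ pvD dm (min u v) (max u v) ≤ r))),
       (PySem.List.pyRange 0 n 1).filter (fun v =>
          decide (v ≠ u ∧ pvD dm (min u v) (max u v) ≤ r2))) := by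
  unfold pvBRow
  have hbody : (PySem.List.pyRange 0 n 1).foldl (fun acc v =>
      if v = u then acc
      else
        let d := PySem.List.pyGetD (PySem.List.pyGetD dm (min u v) []) (max u v) 0
        if d ≤ r2 then
          if d ≤ r then (acc.1 + (r - d), acc.2.1 ++ [v], acc.2.2 ++ [v])
          else (acc.1, acc.2.1, acc.2.2 ++ [v])
        else acc) ((0 : Int), ([] : List Int), ([] : List Int)) =
      (PySem.List.pyRange 0 n 1).foldl (fun acc v =>
        (acc.1 + (if v ≠ u ∧ (pvD dm (min u v) (max u v) ≤ r2 ∧ pvD dm (min u v) (max u v) ≤ r)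
            then r - pvD dm (min u v) (max u v) else 0),
         (if v ≠ u ∧ (pvD dm (min u v) (max u v) ≤ r2 ∧ pvD dm (min u v) (max u v) ≤ r)
            then acc.2.1 ++ [v] else acc.2.1),
         (if v ≠ u ∧ pvD dm (min u v) (max u v) ≤ r2 then acc.2.2 ++ [v] else acc.2.2)))
        ((0 : Int), ([] : List Int), ([] : List Int)) := by
    apply PySem.List.foldl_congr_mem'
    intro v _ acc
    obtain ⟨a, b, c⟩ := acc
    simp only [pvD]
    split_ifs <;> simp_all
  rw [hbody]
  rw [pvFoldlProd3 (PySem.List.pyRange 0 n 1)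
    (fun a v => a + (if v ≠ u ∧ (pvD dm (min u v) (max u v) ≤ r2 ∧ pvD dm (min u v) (max u v) ≤ r)
        then r - pvD dm (min u v) (max u v) else 0))
    (fun b v => if v ≠ u ∧ (pvD dm (min u v) (max u v) ≤ r2 ∧ pvD dm (min u v) (max u v) ≤ r)
        then b ++ [v] else b)
    (fun c v => if v ≠ u ∧ pvD dm (min u v) (max u v) ≤ r2 then c ++ [v] else c) 0 [] []]
  refine congrArg₂ _ ?_ (congrArg₂ _ ?_ ?_)
  · rw [PySem.List.foldl_add (PySem.List.pyRange 0 n 1)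
      (fun v => if v ≠ u ∧ (pvD dm (min u v) (max u v) ≤ r2 ∧ pvD dm (min u v) (max u v) ≤ r)
        then r - pvD dm (min u v) (max u v) else 0) 0]
    rw [pvSumIte (PySem.List.pyRange 0 n 1)
      (fun v => v ≠ u ∧ (pvD dm (min u v) (max u v) ≤ r2 ∧ pvD dm (min u v) (max u v) ≤ r))
      (fun v => r - pvD dm (min u v) (max u v))]
    rw [zero_add]
  · rw [PySem.List.foldl_append_ite_eq_filter
      (fun v => v ≠ u ∧ (pvD dm (min u v) (max u v) ≤ r2 ∧ pvD dm (min u v) (max u v) ≤ r))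
      (PySem.List.pyRange 0 n 1) []]
    rw [List.nil_append]
  · rw [PySem.List.foldl_append_ite_eq_filter
      (fun v => v ≠ u ∧ pvD dm (min u v) (max u v) ≤ r2) (PySem.List.pyRange 0 n 1) []]
    rw [List.nil_append]

theorem pvMain (n : Int) (dm : List (List Int)) (r r2 : Int) :
    MinMaxLPneighbors n dm r r2 = MinMaxLPneighbors_alt n dm r r2 := by
  have hkL0 : (pvL0 n).keys = PySem.List.pyRange 0 n 1 := pvInitKeys n 0
  have hkNR0 : (pvNR0 n).keys = PySem.List.pyRange 0 n 1 := pvInitKeys n []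
  have hmemL : ∀ p ∈ pvPairs n, p.1 ∈ (pvL0 n).keys ∧ p.2 ∈ (pvL0 n).keys := by
    intro p hp
    obtain ⟨ha, hb, hc⟩ := pvMemPairs hp
    simp only [hkL0, PySem.List.mem_pyRange_one]
    omega
  have hmemN : ∀ p ∈ pvPairs n, p.1 ∈ (pvNR0 n).keys ∧ p.2 ∈ (pvNR0 n).keys := by
    intro p hp
    obtain ⟨ha, hb, hc⟩ := pvMemPairs hp
    simp only [hkNR0, PySem.List.mem_pyRange_one]
    omega
  have hkL : ((pvPairs n).foldl (pvFL dm r r2) (pvL0 n)).keys = PySem.List.pyRange 0 n 1 :=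
    (pvKeysPairfold (pvPairs n) (fun u v => pvD dm u v ≤ r2 ∧ pvD dm u v ≤ r) 0
      (fun u v x => x + (r - pvD dm u v)) (fun u v x => x + (r - pvD dm u v))
      (pvL0 n) hmemL).trans hkL0
  have hkR : ((pvPairs n).foldl (pvFR dm r r2) (pvNR0 n)).keys = PySem.List.pyRange 0 n 1 :=
    (pvKeysPairfold (pvPairs n) (fun u v => pvD dm u v ≤ r2 ∧ pvD dm u v ≤ r) []
      (fun u v x => x ++ [v]) (fun u v x => x ++ [u]) (pvNR0 n) hmemN).trans hkNR0
  have hkR2 : ((pvPairs n).foldl (pvFR2 dm r2) (pvNR0 n)).keys = PySem.List.pyRange 0 n 1 :=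
    (pvKeysPairfold (pvPairs n) (fun u v => pvD dm u v ≤ r2) []
      (fun u v x => x ++ [v]) (fun u v x => x ++ [u]) (pvNR0 n) hmemN).trans hkNR0
  rw [pvAItems, pvBItems]
  have hpairsflat : ∀ {α : Type} (g : Int × Int → List α), (pvPairs n).flatMap g =
      (PySem.List.pyRange 0 n 1).flatMap (fun u =>
        (PySem.List.pyRange (u + 1) n 1).flatMap (fun v => g (u, v))) := by
    intro α g
    unfold pvPairs
    rw [List.flatMap_assoc]
    apply List.flatMap_congr
    intro u _
    rw [List.flatMap_map]
  refine congrArg₂ Prod.mk ?_ (congrArg₂ Prod.mk ?_ ?_)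
  · -- L_t values
    rw [PySem.Dict.items_eq_map_keys _ (hkL ▸ PySem.List.nodup_pyRange_one 0 n) 0, hkL]
    apply List.map_eq_map_iff.mpr
    intro t ht
    rw [PySem.List.mem_pyRange_one] at ht
    have hgd : ((pvPairs n).foldl (pvFL dm r r2) (pvL0 n)).getD t 0 =
        (pvL0 n).getD t 0 + ((pvPairs n).flatMap (fun p =>
          if pvD dm p.1 p.2 ≤ r2 ∧ pvD dm p.1 p.2 ≤ r then
            ((if p.1 = t then [r - pvD dm p.1 p.2] else []) ++
             (if p.2 = t then [r - pvD dm p.1 p.2] else []))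
          else [])).sum :=
      pvGetDPairfoldAdd (pvPairs n) (fun u v => pvD dm u v ≤ r2 ∧ pvD dm u v ≤ r)
        (fun u v => r - pvD dm u v) (pvL0 n) t
    have hgd0 : (pvL0 n).getD t 0 = 0 :=
      pvInitGetD (PySem.List.pyRange 0 n 1) 0 PySem.Dict.empty t (PySem.Dict.getD_empty ..)
    rw [hgd, hgd0, zero_add, hpairsflat]
    have hamt : (PySem.List.pyRange 0 n 1).flatMap (fun u =>
        (PySem.List.pyRange (u + 1) n 1).flatMap (fun v =>
          if pvD dm (u, v).1 (u, v).2 ≤ r2 ∧ pvD dm (u, v).1 (u, v).2 ≤ r then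
            ((if (u, v).1 = t then [r - pvD dm (u, v).1 (u, v).2] else []) ++
             (if (u, v).2 = t then [r - pvD dm (u, v).1 (u, v).2] else []))
          else [])) =
        (PySem.List.pyRange 0 n 1).flatMap (fun u =>
          (PySem.List.pyRange (u + 1) n 1).flatMap (fun v =>
            if pvD dm u v ≤ r2 ∧ pvD dm u v ≤ r then
              ((if u = t then [r - pvD dm (min u v) (max u v)] else []) ++
               (if v = t then [r - pvD dm (min v u) (max v u)] else []))
            else [])) := by
      apply List.flatMap_congr
      intro u hu
      apply List.flatMap_congr
      intro v hv
      rw [PySem.List.mem_pyRange_one] at hu hv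
      rw [show min u v = u by omega, show max u v = v by omega,
        show min v u = u by omega, show max v u = v by omega]
    rw [hamt, pvPairContrib n t (by omega) ht.2
      (fun u v => pvD dm u v ≤ r2 ∧ pvD dm u v ≤ r)
      (fun a b => r - pvD dm (min a b) (max a b)), pvBRowEq]
  · -- r-neighborhoods
    rw [PySem.Dict.items_eq_map_keys _ (hkR ▸ PySem.List.nodup_pyRange_one 0 n) [], hkR]
    apply List.map_eq_map_iff.mpr
    intro t ht
    rw [PySem.List.mem_pyRange_one] at ht
    have hgd : ((pvPairs n).foldl (pvFR dm r r2) (pvNR0 n)).getD t [] =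
        (pvNR0 n).getD t [] ++ (pvPairs n).flatMap (fun p =>
          if pvD dm p.1 p.2 ≤ r2 ∧ pvD dm p.1 p.2 ≤ r then
            ((if p.1 = t then [p.2] else []) ++ (if p.2 = t then [p.1] else []))
          else []) :=
      pvGetDPairfoldAppend (pvPairs n) (fun u v => pvD dm u v ≤ r2 ∧ pvD dm u v ≤ r) (pvNR0 n) t
    have hgd0 : (pvNR0 n).getD t [] = [] :=
      pvInitGetD (PySem.List.pyRange 0 n 1) [] PySem.Dict.empty t (PySem.Dict.getD_empty ..)
    rw [hgd, hgd0, List.nil_append, hpairsflat]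
    rw [pvPairContrib n t (by omega) ht.2
      (fun u v => pvD dm u v ≤ r2 ∧ pvD dm u v ≤ r) (fun _ w => w), pvBRowEq]
    simp [List.map_id']
  · -- r2-neighborhoods
    rw [PySem.Dict.items_eq_map_keys _ (hkR2 ▸ PySem.List.nodup_pyRange_one 0 n) [], hkR2]
    apply List.map_eq_map_iff.mpr
    intro t ht
    rw [PySem.List.mem_pyRange_one] at ht
    have hgd : ((pvPairs n).foldl (pvFR2 dm r2) (pvNR0 n)).getD t [] =
        (pvNR0 n).getD t [] ++ (pvPairs n).flatMap (fun p =>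
          if pvD dm p.1 p.2 ≤ r2 then
            ((if p.1 = t then [p.2] else []) ++ (if p.2 = t then [p.1] else []))
          else []) :=
      pvGetDPairfoldAppend (pvPairs n) (fun u v => pvD dm u v ≤ r2) (pvNR0 n) t
    have hgd0 : (pvNR0 n).getD t [] = [] :=
      pvInitGetD (PySem.List.pyRange 0 n 1) [] PySem.Dict.empty t (PySem.Dict.getD_empty ..)
    rw [hgd, hgd0, List.nil_append, hpairsflat]
    rw [pvPairContrib n t (by omega) ht.2
      (fun u v => pvD dm u v ≤ r2) (fun _ w => w), pvBRowEq]
    simp [List.map_id']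

-- ===== VERDICT (by name: the statement is the Claim_ definition above) =====
theorem MinMaxLPneighbors_spec : Claim_equal_MinMaxLPneighbors := by
  intro n distances r r2 _ _
  unfold Spec_MinMaxLPneighbors
  exact pvMain n distances r r2
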